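-- pv_equiv track=rewrite | github.com/Spookyerol/Bioinformatics | localAlign.py | findDiagonals
-- ===== SOURCE A (Python) =====
-- def findDiagonals(seqA, seqB, ktup):
--     matchPairs = []
--     lenA = len(seqA)
--     lenB = len(seqB)
--
--     #find all the matching subsequences of length ktup
--     while(matchPairs == []):
--         for i in range(lenA-ktup+1):
--             for j in range(lenB-ktup+1):
--                 if(seqA[i:i+ktup] == seqB[j:j+ktup]):
--                     matchPairs.insert(0,(i,j))
--         ktup -= 1
--         if(ktup == 0):
--             break
--
--     #place all the match pairs into their corresponding diagonals
--     diagonals = {}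
--     for pair in matchPairs:
--         diff = pair[0] - pair[1]
--         if(diff not in diagonals):
--             diagonals[diff] = [(pair[0],pair[1])]
--         else:
--             diagonals[diff].append((pair[0],pair[1]))
--
--     return diagonals
-- ===== SOURCE B (Python) =====
-- def findDiagonals(seqA, seqB, ktup):
--     lenA, lenB = len(seqA), len(seqB)
--     k = ktup
--     while True:
--         # hash-index seqB's k-tuples once
--         index = {}
--         for j in range(lenB - k + 1):
--             index.setdefault(seqB[j:j+k], []).append(j)
--         # group matches directly by diagonal, scanning i (and j) descending,
--         # which is exactly the order A's prepend-then-group produces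
--         diagonals = {}
--         for i in range(lenA - k, -1, -1):
--             for j in reversed(index.get(seqA[i:i+k], ())):
--                 diagonals.setdefault(i - j, []).append((i, j))
--         k -= 1
--         if diagonals or k == 0:
--             return diagonals
-- ===== Notes on version B (the rewrite author's own statement) =====
-- stated objective: faster
-- what changed: B replaces A's all-pairs k-tuple comparison plus prepend-then-group pipeline by a dict indexing seqB's k-tuples once per pass and a single descending scan of seqA that groups matches into the diagonals dict directly, with no intermediate match-pair list.
import Mathlib
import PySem

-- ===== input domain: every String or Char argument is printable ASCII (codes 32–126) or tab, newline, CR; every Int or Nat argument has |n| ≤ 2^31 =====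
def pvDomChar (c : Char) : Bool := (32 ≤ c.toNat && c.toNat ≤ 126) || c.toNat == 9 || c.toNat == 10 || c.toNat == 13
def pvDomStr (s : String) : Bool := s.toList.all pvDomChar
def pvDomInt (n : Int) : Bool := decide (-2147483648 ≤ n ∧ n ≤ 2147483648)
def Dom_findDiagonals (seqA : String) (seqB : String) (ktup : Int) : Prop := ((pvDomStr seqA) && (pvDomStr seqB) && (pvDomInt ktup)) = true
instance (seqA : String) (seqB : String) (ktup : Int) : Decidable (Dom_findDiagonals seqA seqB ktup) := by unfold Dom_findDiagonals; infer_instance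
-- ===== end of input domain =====

-- B replaces A's all-pairs k-tuple comparison followed by prepend-then-group by a hash index of
-- seqB's k-tuples and ONE descending scan of seqA that groups matches into the diagonals dict
-- directly, with no intermediate match list (objective: faster, asymptotic). Same return value
-- everywhere (A always returns: even for ktup ≤ 0 its retry loop stops after one pass).

-- ===== PORT A =====
-- matchPairs.insert(0, (i,j)) prepends; the nested for-loops are foldl over pyRange.
def pvBodyA (a b : List Char) (k : Int) (acc : List (Int × Int)) : List (Int × Int) :=
  (PySem.List.pyRange 0 ((a.length : Int) - k + 1)).foldl (fun acc i =>
    (PySem.List.pyRange 0 ((b.length : Int) - k + 1)).foldl (fun acc j =>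
      if PySem.List.slice a (some i) (some (i + k)) == PySem.List.slice b (some j) (some (j + k))
      then (i, j) :: acc else acc) acc) acc

-- the 'while(matchPairs == []): … ktup -= 1; if ktup == 0: break' loop; fuel ktup.toNat + 1
-- only bounds the recursion and is never exhausted before the Python loop stops (for k < 0 the
-- first pass always matches an empty trailing slice, for k ≥ 0 the loop breaks by ktup == 0).
def pvLoopA (a b : List Char) : Nat → Int → List (Int × Int) → List (Int × Int)
  | 0, _, acc => acc
  | f + 1, k, acc =>
    if acc = [] then
      let acc' := pvBodyA a b k acc
      if k - 1 = 0 then acc' else pvLoopA a b f (k - 1) acc'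
    else acc

def findDiagonals (seqA : String) (seqB : String) (ktup : Int) : List (Int × List (Int × Int)) :=
  let matchPairs := pvLoopA seqA.toList seqB.toList (ktup.toNat + 1) ktup []
  -- 'diagonals[diff].append(p)' in the else-branch (key present) is Dict.modify diff [] (· ++ [p])
  (matchPairs.foldl (fun d p =>
      let diff := p.1 - p.2
      if d.contains diff = false then d.insert diff [(p.1, p.2)]
      else d.modify diff [] (fun l => l ++ [(p.1, p.2)])) PySem.Dict.empty).items

-- ===== PORT B =====
-- index.setdefault(seqB[j:j+k], []).append(j) is Dict.modify key [] (· ++ [j]).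
def pvIdxB (b : List Char) (k : Int) : PySem.Dict (List Char) (List Int) :=
  (PySem.List.pyRange 0 ((b.length : Int) - k + 1)).foldl
    (fun d j => d.modify (PySem.List.slice b (some j) (some (j + k))) [] (fun l => l ++ [j]))
    PySem.Dict.empty

-- one pass at tuple length k: 'for i in range(lenA-k, -1, -1): for j in reversed(index.get(…, ())):
--   diagonals.setdefault(i-j, []).append((i,j))'
def pvPassB (a b : List Char) (k : Int) : PySem.Dict Int (List (Int × Int)) :=
  (PySem.List.pyRange ((a.length : Int) - k) (-1) (-1)).foldl (fun d i =>
    ((pvIdxB b k).getD (PySem.List.slice a (some i) (some (i + k))) []).reverse.foldl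
      (fun d j => d.modify (i - j) [] (fun l => l ++ [(i, j)])) d)
    PySem.Dict.empty

-- 'while True: … k -= 1; if diagonals or k == 0: return diagonals'; the fuel is never
-- exhausted before the Python loop returns, for the same reason as in port A.
def pvLoopB (a b : List Char) : Nat → Int → PySem.Dict Int (List (Int × Int))
  | 0, _ => PySem.Dict.empty
  | f + 1, k =>
    let d := pvPassB a b k
    if d.items ≠ [] ∨ k - 1 = 0 then d else pvLoopB a b f (k - 1)

def findDiagonals_alt (seqA : String) (seqB : String) (ktup : Int) : List (Int × List (Int × Int)) :=
  (pvLoopB seqA.toList seqB.toList (ktup.toNat + 1) ktup).items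

-- ===== PRECONDITION & SPEC =====
def Spec_findDiagonals (seqA : String) (seqB : String) (ktup : Int) (out : List (Int × List (Int × Int))) : Prop := out = findDiagonals_alt seqA seqB ktup
instance (seqA : String) (seqB : String) (ktup : Int) (out : List (Int × List (Int × Int))) : Decidable (Spec_findDiagonals seqA seqB ktup out) := by unfold Spec_findDiagonals; infer_instance

-- ===== CLAIM (what is proved, stated in full; the proofs are below) =====
def Claim_equal_findDiagonals : Prop := ∀ (seqA : String) (seqB : String) (ktup : Int), Dom_findDiagonals seqA seqB ktup → Spec_findDiagonals seqA seqB ktup (findDiagonals seqA seqB ktup)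

-- ===== LEMMAS AND PROOFS =====

-- the ascending list of matching (i, j) pairs at tuple length k
def pvPairs (a b : List Char) (k : Int) : List (Int × Int) :=
  (PySem.List.pyRange 0 ((a.length : Int) - k + 1)).flatMap (fun i =>
    ((PySem.List.pyRange 0 ((b.length : Int) - k + 1)).filter (fun j =>
      PySem.List.slice a (some i) (some (i + k)) == PySem.List.slice b (some j) (some (j + k)))).map
      (fun j => (i, j)))

-- grouping a pair list into the diagonals dict, in list order
def pvGrp (L : List (Int × Int)) : PySem.Dict Int (List (Int × Int)) :=
  L.foldl (fun d p => d.modify (p.1 - p.2) [] (fun l => l ++ [(p.1, p.2)])) PySem.Dict.empty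

theorem pvInnerA (cond : Int → Bool) (i : Int) (js : List Int) (acc : List (Int × Int)) :
    js.foldl (fun acc j => if cond j then (i, j) :: acc else acc) acc
      = ((js.filter cond).map (fun j => (i, j))).reverse ++ acc := by
  induction js generalizing acc with
  | nil => simp
  | cons j js ih =>
    by_cases h : cond j = true <;> simp [List.foldl_cons, h, ih]

theorem pvBodyA_eq (a b : List Char) (k : Int) (acc : List (Int × Int)) :
    pvBodyA a b k acc = (pvPairs a b k).reverse ++ acc := by
  unfold pvBodyA pvPairs
  generalize (PySem.List.pyRange 0 ((a.length : Int) - k + 1)) = is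
  induction is generalizing acc with
  | nil => simp
  | cons i is ih =>
    rw [List.foldl_cons, ih, pvInnerA]
    simp [List.flatMap_cons, List.reverse_append, List.append_assoc]

theorem pvIdxB_getD (b : List Char) (k : Int) (g : List Char) :
    (pvIdxB b k).getD g []
      = (PySem.List.pyRange 0 ((b.length : Int) - k + 1)).filter
          (fun j => PySem.List.slice b (some j) (some (j + k)) == g) := by
  have h : pvIdxB b k
      = ((PySem.List.pyRange 0 ((b.length : Int) - k + 1)).map
          (fun j => (PySem.List.slice b (some j) (some (j + k)), j))).foldl
          (fun d p => d.modify p.1 [] (fun l => l ++ [p.2])) PySem.Dict.empty := by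
    rw [List.foldl_map]; rfl
  rw [h, PySem.Dict.getD_foldl_modify_append]
  simp [List.filter_map, Function.comp_def, List.map_map]

theorem pvBeqComm {α : Type} [BEq α] [LawfulBEq α] (x y : α) : (x == y) = (y == x) := by
  rw [Bool.eq_iff_iff]
  simp only [beq_iff_eq]
  exact eq_comm

theorem pvInnerB (a b : List Char) (k i : Int) (d : PySem.Dict Int (List (Int × Int))) :
    ((pvIdxB b k).getD (PySem.List.slice a (some i) (some (i + k))) []).reverse.foldl
        (fun d j => d.modify (i - j) [] (fun l => l ++ [(i, j)])) d
      = (((PySem.List.pyRange 0 ((b.length : Int) - k + 1)).filter (fun j =>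
            PySem.List.slice a (some i) (some (i + k)) == PySem.List.slice b (some j) (some (j + k)))).map
          (fun j => (i, j))).reverse.foldl
        (fun d p => d.modify (p.1 - p.2) [] (fun l => l ++ [(p.1, p.2)])) d := by
  rw [pvIdxB_getD,
    List.filter_congr (fun j (_ : j ∈ PySem.List.pyRange 0 ((b.length : Int) - k + 1)) =>
      pvBeqComm (PySem.List.slice b (some j) (some (j + k))) (PySem.List.slice a (some i) (some (i + k)))),
    ← List.map_reverse, List.foldl_map]

theorem pvPassB_eq (a b : List Char) (k : Int) :
    pvPassB a b k = pvGrp ((pvPairs a b k).reverse) := by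
  unfold pvPassB pvPairs pvGrp
  rw [PySem.List.pyRange_neg_one_eq_reverse]
  have h0 : (-1 : Int) + 1 = 0 := by norm_num
  rw [h0, List.reverse_flatMap, List.foldl_flatMap]
  congr 1
  funext d i
  simp only [Function.comp_apply]
  exact pvInnerB a b k i d

theorem pvGrp_foldl (L : List (Int × Int)) (d : PySem.Dict Int (List (Int × Int))) :
    L.foldl (fun d p =>
        let diff := p.1 - p.2
        if d.contains diff = false then d.insert diff [(p.1, p.2)]
        else d.modify diff [] (fun l => l ++ [(p.1, p.2)])) d
      = L.foldl (fun d p => d.modify (p.1 - p.2) [] (fun l => l ++ [(p.1, p.2)])) d := by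
  induction L generalizing d with
  | nil => rfl
  | cons p L ih =>
    simp only [List.foldl_cons]
    rw [ih]
    congr 1
    by_cases h : d.contains (p.1 - p.2) = false
    · simp only [h]
      apply PySem.Dict.ext
      simp [PySem.Dict.modify, PySem.Dict.insert, PySem.Dict.getD_of_not_contains _ _ h]
    · simp [h]

theorem pvGrp_items_nil (L : List (Int × Int)) : (pvGrp L).items = [] ↔ L = [] := by
  constructor
  · intro h
    cases L with
    | nil => rfl
    | cons p L =>
      exfalso
      have hk : (pvGrp (p :: L)).keys
          = PySem.Set.update (PySem.Dict.empty : PySem.Dict Int (List (Int × Int))).keys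
              ((p :: L).map (fun q => q.1 - q.2)) :=
        PySem.Dict.keys_foldl_modify_key (p :: L) (fun q => q.1 - q.2) [] (fun _ q l => l ++ [(q.1, q.2)]) _
      have hmem : p.1 - p.2 ∈ (pvGrp (p :: L)).keys := by
        rw [hk]
        exact (PySem.Set.mem_update _ _ _).2 (Or.inr (by simp))
      have hkeys : (pvGrp (p :: L)).keys = [] := by
        simp only [PySem.Dict.keys, h, List.map_nil]
      rw [hkeys] at hmem
      simp at hmem
  · intro h; subst h; rfl

theorem pvLoopA_of_ne (a b : List Char) (f : Nat) (k : Int) (acc : List (Int × Int))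
    (h : acc ≠ []) : pvLoopA a b f k acc = acc := by
  cases f with
  | zero => rfl
  | succ f => simp [pvLoopA, h]

theorem pvLoop_eq (a b : List Char) (f : Nat) (k : Int) :
    pvLoopB a b f k = pvGrp (pvLoopA a b f k []) := by
  induction f generalizing k with
  | zero => rfl
  | succ f ih =>
    simp only [pvLoopB, pvLoopA]
    rw [if_pos trivial, pvBodyA_eq, List.append_nil, pvPassB_eq]
    by_cases hp : pvPairs a b k = []
    · rw [hp]
      simp only [List.reverse_nil]
      by_cases hk : k - 1 = 0
      · rw [if_pos (Or.inr hk), if_pos hk]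
      · rw [if_neg (by rw [not_or]; exact ⟨not_not_intro rfl, hk⟩), if_neg hk]
        exact ih (k - 1)
    · have hacc : (pvPairs a b k).reverse ≠ [] := by simpa using hp
      have hne : (pvGrp ((pvPairs a b k).reverse)).items ≠ [] := by
        rw [ne_eq, pvGrp_items_nil]
        exact hacc
      rw [if_pos (Or.inl hne), pvLoopA_of_ne a b f (k - 1) _ hacc, ite_self]

-- ===== VERDICT (by name: the statement is the Claim_ definition above) =====
theorem findDiagonals_spec : Claim_equal_findDiagonals := by
  intro seqA seqB ktup _
  unfold Spec_findDiagonals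
  simp only [findDiagonals, findDiagonals_alt]
  rw [pvGrp_foldl, pvLoop_eq]
  rfl
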